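/- GENERATED by farm/mkstatement.py from design/units.tsv (unit `free`) and the Specs of ProgX/Base/Spec/*.lean — do not edit.
   THE STATEMENT of the proof unit `free`: the function `free` (12 instructions) satisfies its contract,
   given the contracts of its callees. What the names mean: ProgX/Base/Spec/Basic.lean. The theorem to prove:
   `theorem free_ok : ProgX.Base.Spec.free.Statement`. -/
import ProgX.Base.Spec.Heap
import ProgX.Base.Spec.Runtime
namespace ProgX.Base.Spec.free
open X86 X86.User Asan

/-- The statement of unit `free`. -/
def Statement : Prop :=
  ∀ (Lay : Layout) (_hLay : Lay.hi = 0x1000000) (μ : Microarch) (_hμ : UserX.MicroOK μ) (u₀ : State)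
    (_hcode : HasCodeNat Lay u₀ ProgX.Base.L.free.entry ProgX.Base.Code.code_free.nat ProgX.Base.L.free.size)
    (_h_heap_live_size : ∀ (H : Heap) (n : Nat), Calls Lay μ ProgX.Base.WayInv (ProgX.Base.conv u₀) ProgX.Base.L.heap_live_size.entry (ProgX.Base.Spec.heap_live_size.spec H n))
    (_h_arena_poison : Calls Lay μ ProgX.Base.WayInv (ProgX.Base.conv u₀) ProgX.Base.L.arena_poison.entry Asan.arenaPoisonSpec),
    ∀ (H : Heap) (rest : List Obj) (frames : List (Nat × FrameLayout)) (n : Nat), Calls Lay μ ProgX.Base.WayInv (ProgX.Base.conv u₀) ProgX.Base.L.free.entry (ProgX.Base.Spec.free.spec H rest frames n)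

end ProgX.Base.Spec.free
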